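-- pv_equiv track=rewrite | github.com/Hugo-Blvr/stage_m2 | 07_TE_in_inversion/script/plot.py | reduire_intervalles
-- ===== SOURCE A (Python) =====
-- def reduire_intervalles(liste, x):
--     if x < 3: return liste
--
--     liste = sorted(liste)
--     pas_de_base = liste[1] - liste[0]
--     min_val = liste[0]
--     max_val = liste[-1]
--     meilleur_resultat = None
--     meilleur_total = 0
--
--     for facteur in range(1, (max_val - 0) // pas_de_base + 1):
--         pas = facteur * pas_de_base
--         # On ne garde le pas que si min_val et max_val sont alignés avec ce pas
--         if (0 - min_val) % pas != 0 or (max_val - 0) % pas != 0: continue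
--
--         gauche = list(range(min_val + pas, 0, pas))
--         droite = list(range(pas, max_val, pas))
--         total = 1 + len(gauche) + 1 + len(droite) + 1  # min + gauche + 0 + droite + max
--         if total <= x and total > meilleur_total:
--             meilleur_resultat = [min_val] + gauche + [0] + droite + [max_val]
--             meilleur_total = total
--
--     if meilleur_resultat is None: return [min_val, 0, max_val]
--
--     return meilleur_resultat
-- ===== SOURCE B (Python) =====
-- def reduire_intervalles(liste, x):
--     if x < 3:
--         return liste
--     s = sorted(liste)
--     base = s[1] - s[0]
--     mn, mx = s[0], s[-1]
--     # gcd(|mn|, |mx|) by Euclid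
--     a, b = abs(mn), abs(mx)
--     while b:
--         a, b = b, a % b
--     g = a
--     borne = mx // base  # largest facteur A would try
--     # ascending list of the positive divisors of g (empty when g == 0)
--     small, large = [], []
--     i = 1
--     while i * i <= g:
--         if g % i == 0:
--             small.append(i)
--             if i * i != g:
--                 large.append(g // i)
--         i += 1
--     # candidate steps: divisors of g that are multiples of base, with facteur <= borne;
--     # the point count is antitone in the step, so the FIRST small-enough step is A's best
--     for pas in small + large[::-1]:
--         if pas % base == 0 and pas // base <= borne:
--             total = 3 + len(range(mn + pas, 0, pas)) + len(range(pas, mx, pas))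
--             if total <= x:
--                 return [mn] + list(range(mn + pas, 0, pas)) + [0] + list(range(pas, mx, pas)) + [mx]
--     return [mn, 0, mx]
-- ===== Notes on version B (the rewrite author's own statement) =====
-- stated objective: faster
-- what changed: A scans every facteur from 1 to max_val//pas_de_base keeping the best point count; B enumerates the divisors of gcd(|min|,max) by trial division up to sqrt, filters those that are multiples of the base step, and returns at the FIRST step whose point count fits (the count is antitone in the step, so first-fit equals A's argmax).
import Mathlib
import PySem

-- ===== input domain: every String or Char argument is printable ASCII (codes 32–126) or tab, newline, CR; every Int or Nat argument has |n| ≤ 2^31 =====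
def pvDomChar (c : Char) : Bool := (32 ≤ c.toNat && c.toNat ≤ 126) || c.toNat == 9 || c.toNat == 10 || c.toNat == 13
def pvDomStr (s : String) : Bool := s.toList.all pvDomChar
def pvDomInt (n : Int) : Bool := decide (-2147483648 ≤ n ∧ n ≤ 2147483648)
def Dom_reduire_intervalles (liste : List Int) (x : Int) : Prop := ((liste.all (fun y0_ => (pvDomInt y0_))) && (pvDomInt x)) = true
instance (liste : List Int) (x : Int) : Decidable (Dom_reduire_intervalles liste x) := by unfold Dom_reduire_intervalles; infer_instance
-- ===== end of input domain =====

-- B replaces A's linear scan over all facteurs (argmax with best-tracking) by a divisor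
-- enumeration of gcd(|min|, max) up to its square root with an early first-fit return;
-- objective: faster (the point count is antitone in the step, so first-fit = A's argmax).


-- ===== PORT A =====
def reduire_intervalles (liste : List Int) (x : Int) : List Int :=
  if x < 3 then liste
  else
    let l := PySem.List.sorted liste (fun v => v)
    let pas_de_base := PySem.List.pyGetD l 1 0 - PySem.List.pyGetD l 0 0
    let min_val := PySem.List.pyGetD l 0 0
    let max_val := PySem.List.pyGetD l (-1) 0
    let st := (PySem.List.pyRange 1 (PySem.Int.floordiv (max_val - 0) pas_de_base + 1) 1).foldl
      (fun st facteur =>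
        let pas := facteur * pas_de_base
        if PySem.Int.mod (0 - min_val) pas ≠ 0 ∨ PySem.Int.mod (max_val - 0) pas ≠ 0 then st
        else
          let gauche := PySem.List.pyRange (min_val + pas) 0 pas
          let droite := PySem.List.pyRange pas max_val pas
          let total := 1 + (gauche.length : Int) + 1 + (droite.length : Int) + 1
          if total ≤ x ∧ total > st.2 then
            (some ([min_val] ++ gauche ++ [0] ++ droite ++ [max_val]), total)
          else st)
      ((none : Option (List Int)), (0 : Int))
    match st.1 with
    | none => [min_val, 0, max_val]
    | some r => r

-- ===== PORT B =====
-- Source B's Euclid loop `while b: a, b = b, a % b` on abs(mn), abs(mx) (nonnegative ints = Nat)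
def pvGcd (a b : Nat) : Nat :=
  if b = 0 then a else pvGcd b (a % b)
termination_by b
decreasing_by rename_i h; exact Nat.mod_lt _ (Nat.pos_of_ne_zero h)

-- Source B's `while i * i <= g` trial-division loop collecting small/large divisors
-- (i and g are nonnegative Python ints; % and // on them are Nat.mod / Nat.div, exact)
def pvDivLoop (g i : Nat) (small large : List Int) : List Int × List Int :=
  if i * i ≤ g then
    if g % i = 0 then
      pvDivLoop g (i + 1) (small ++ [(i : Int)])
        (if i * i ≠ g then large ++ [((g / i : Nat) : Int)] else large)
    else pvDivLoop g (i + 1) small large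
  else (small, large)
termination_by g + 1 - i
decreasing_by
  all_goals
    rename_i h _
    rcases Nat.eq_zero_or_pos i with h0 | h0
    · omega
    · have := Nat.le_mul_of_pos_left i h0; omega

-- Source B's `for pas in small + large[::-1]` first-fit loop (early return at the first fit)
def pvScan (base borne mn mx x : Int) : List Int → List Int
  | [] => [mn, 0, mx]
  | pas :: rest =>
    if PySem.Int.mod pas base = 0 ∧ PySem.Int.floordiv pas base ≤ borne then
      if 3 + ((PySem.List.pyRange (mn + pas) 0 pas).length : Int)
           + ((PySem.List.pyRange pas mx pas).length : Int) ≤ x then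
        [mn] ++ PySem.List.pyRange (mn + pas) 0 pas ++ [0]
           ++ PySem.List.pyRange pas mx pas ++ [mx]
      else pvScan base borne mn mx x rest
    else pvScan base borne mn mx x rest

def reduire_intervalles_alt (liste : List Int) (x : Int) : List Int :=
  if x < 3 then liste
  else
    let s := PySem.List.sorted liste (fun v => v)
    let base := PySem.List.pyGetD s 1 0 - PySem.List.pyGetD s 0 0
    let mn := PySem.List.pyGetD s 0 0
    let mx := PySem.List.pyGetD s (-1) 0
    let g := pvGcd mn.natAbs mx.natAbs
    let borne := PySem.Int.floordiv mx base
    let sl := pvDivLoop g 1 [] []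
    pvScan base borne mn mx x (sl.1 ++ sl.2.reverse)

-- ===== PRECONDITION & SPEC =====
-- Pre_ excludes exactly the inputs where A raises: with x ≥ 3, a list of fewer than two
-- elements (IndexError on liste[1]) or a list whose two smallest elements are equal
-- (pas_de_base = 0, ZeroDivisionError in the range bound).
def Pre_reduire_intervalles (liste : List Int) (x : Int) : Prop :=
  x < 3 ∨ (2 ≤ liste.length ∧
    PySem.List.pyGetD (PySem.List.sorted liste (fun v => v)) 0 0 ≠
      PySem.List.pyGetD (PySem.List.sorted liste (fun v => v)) 1 0)
instance (liste : List Int) (x : Int) : Decidable (Pre_reduire_intervalles liste x) := by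
  unfold Pre_reduire_intervalles; infer_instance

def pvWitness_reduire_intervalles : List Int × Int := ([0, 2, 4, 6], 3)

def Spec_reduire_intervalles (liste : List Int) (x : Int) (out : List Int) : Prop := out = reduire_intervalles_alt liste x
instance (liste : List Int) (x : Int) (out : List Int) : Decidable (Spec_reduire_intervalles liste x out) := by unfold Spec_reduire_intervalles; infer_instance

-- ===== CLAIM (what is proved, stated in full; the proofs are below) =====
def Claim_equal_reduire_intervalles : Prop := ∀ (liste : List Int) (x : Int), Dom_reduire_intervalles liste x → Pre_reduire_intervalles liste x → Spec_reduire_intervalles liste x (reduire_intervalles liste x)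

-- ===== LEMMAS AND PROOFS =====

-- the point count of step p, and the produced list (shared shape of both ports)
def pvTot (mn mx p : Int) : Int :=
  3 + ((PySem.List.pyRange (mn + p) 0 p).length : Int)
    + ((PySem.List.pyRange p mx p).length : Int)
def pvBuild (mn mx p : Int) : List Int :=
  [mn] ++ PySem.List.pyRange (mn + p) 0 p ++ [0] ++ PySem.List.pyRange p mx p ++ [mx]

-- A's loop body, rephrased on the step p = facteur * base
def pvStepA (mn mx x : Int) (st : Option (List Int) × Int) (p : Int) : Option (List Int) × Int :=
  if ¬ p ∣ mn ∨ ¬ p ∣ mx then st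
  else if pvTot mn mx p ≤ x ∧ pvTot mn mx p > st.2 then (some (pvBuild mn mx p), pvTot mn mx p)
  else st

def pvQ (mn mx x : Int) (p : Int) : Bool :=
  decide (pvTot mn mx p ≤ x) && (decide (p ∣ mn) && decide (p ∣ mx))
def pvQB (base borne mn mx x : Int) (p : Int) : Bool :=
  decide (pvTot mn mx p ≤ x) && (decide (base ∣ p) && decide (PySem.Int.floordiv p base ≤ borne))

def pvSmallSpec (g i : Nat) : List Int :=
  ((List.range' i (g.sqrt + 1 - i)).filter (fun d : Nat => g % d == 0)).map (fun d : Nat => (d : Int))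
def pvLargeSpec (g i : Nat) : List Int :=
  ((List.range' i (g.sqrt + 1 - i)).filter (fun d : Nat => g % d == 0 && !(d * d == g))).map
    (fun d : Nat => ((g / d : Nat) : Int))

-- ---- range lengths in closed form, antitonicity of the point count ----
theorem pv_len_gauche (mn p : Int) (hp : 0 < p) :
    ((PySem.List.pyRange (mn + p) 0 p).length : Int) = ((-mn - 1) / p).toNat := by
  rw [PySem.List.pyRange_of_pos _ _ hp]
  simp only [List.length_map, List.length_range]
  have he : 0 - (mn + p) + p - 1 = -mn - 1 := by ring
  split_ifs with h
  · rw [he]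
  · have h0 : -mn - 1 < p := by omega
    rcases le_or_gt 0 (-mn - 1) with h1 | h1
    · rw [Int.ediv_eq_zero_of_lt h1 h0]; rfl
    · have := Int.ediv_neg_of_neg_of_pos h1 hp
      simp [Int.toNat_of_nonpos (le_of_lt this)]

theorem pv_len_droite (mx p : Int) (hp : 0 < p) :
    ((PySem.List.pyRange p mx p).length : Int) = ((mx - 1) / p).toNat := by
  rw [PySem.List.pyRange_of_pos _ _ hp]
  simp only [List.length_map, List.length_range]
  have he : mx - p + p - 1 = mx - 1 := by ring
  split_ifs with h
  · rw [he]
  · have h0 : mx - 1 < p := by omega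
    rcases le_or_gt 0 (mx - 1) with h1 | h1
    · rw [Int.ediv_eq_zero_of_lt h1 h0]; rfl
    · have := Int.ediv_neg_of_neg_of_pos h1 hp
      simp [Int.toNat_of_nonpos (le_of_lt this)]

theorem pv_div_toNat_antitone (a p q : Int) (hp : 0 < p) (hpq : p ≤ q) :
    (a / q).toNat ≤ (a / p).toNat := by
  rcases le_or_gt 0 a with ha | ha
  · have hq : 0 < q := lt_of_lt_of_le hp hpq
    have e1 : a / q = ((a.toNat / q.toNat : Nat) : Int) := by
      rw [Int.natCast_ediv, Int.toNat_of_nonneg ha, Int.toNat_of_nonneg (le_of_lt hq)]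
    have e2 : a / p = ((a.toNat / p.toNat : Nat) : Int) := by
      rw [Int.natCast_ediv, Int.toNat_of_nonneg ha, Int.toNat_of_nonneg (le_of_lt hp)]
    rw [e1, e2, Int.toNat_natCast, Int.toNat_natCast]
    exact Nat.div_le_div_left (by omega) (by omega)
  · have : a / q < 0 := Int.ediv_neg_of_neg_of_pos ha (lt_of_lt_of_le hp hpq)
    simp [Int.toNat_of_nonpos (le_of_lt this)]

theorem pv_tot_antitone (mn mx p q : Int) (hp : 0 < p) (hpq : p ≤ q) :
    pvTot mn mx q ≤ pvTot mn mx p := by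
  have hq : 0 < q := lt_of_lt_of_le hp hpq
  unfold pvTot
  rw [pv_len_gauche mn p hp, pv_len_droite mx p hp, pv_len_gauche mn q hq, pv_len_droite mx q hq]
  have h1 := pv_div_toNat_antitone (-mn - 1) p q hp hpq
  have h2 := pv_div_toNat_antitone (mx - 1) p q hp hpq
  omega

theorem pv_tot_ge (mn mx p : Int) : 3 ≤ pvTot mn mx p := by
  unfold pvTot
  have h1 : (0:Int) ≤ ((PySem.List.pyRange (mn + p) 0 p).length : Int) := Int.natCast_nonneg _
  have h2 : (0:Int) ≤ ((PySem.List.pyRange p mx p).length : Int) := Int.natCast_nonneg _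
  omega

-- ---- first-fit characterisation of A's fold ----
theorem pv_freeze (mn mx x : Int) (ps : List Int) (b : List Int) (t : Int)
    (h : ∀ p ∈ ps, pvTot mn mx p ≤ t) :
    ps.foldl (pvStepA mn mx x) (some b, t) = (some b, t) := by
  induction ps with
  | nil => rfl
  | cons p ps ih =>
    have hstep : pvStepA mn mx x (some b, t) p = (some b, t) := by
      unfold pvStepA
      split_ifs with h1 h2
      · rfl
      · exact absurd h2.2 (by simpa using h p (by simp))
      · rfl
    rw [List.foldl_cons, hstep]
    exact ih (fun q hq => h q (by simp [hq]))

theorem pv_ff (mn mx x : Int) (ps : List Int) (hpos : ∀ p ∈ ps, 0 < p)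
    (hsort : ps.Pairwise (· ≤ ·)) :
    ps.foldl (pvStepA mn mx x) (none, 0) =
      match (ps.filter (pvQ mn mx x)).head? with
      | none => (none, 0)
      | some p => (some (pvBuild mn mx p), pvTot mn mx p) := by
  induction ps with
  | nil => rfl
  | cons p ps ih =>
    rw [List.pairwise_cons] at hsort
    by_cases hq : pvQ mn mx x p = true
    · have hq' := hq
      unfold pvQ at hq'
      simp only [Bool.and_eq_true, decide_eq_true_eq] at hq'
      have hstep : pvStepA mn mx x (none, 0) p = (some (pvBuild mn mx p), pvTot mn mx p) := by
        unfold pvStepA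
        rw [if_neg (by push Not; exact ⟨hq'.2.1, hq'.2.2⟩),
          if_pos ⟨hq'.1, by have := pv_tot_ge mn mx p; simp; omega⟩]
      rw [List.foldl_cons, hstep, List.filter_cons_of_pos hq]
      rw [pv_freeze mn mx x ps (pvBuild mn mx p) (pvTot mn mx p)
        (fun q hqm => pv_tot_antitone mn mx p q (hpos p (by simp)) (hsort.1 q hqm))]
      simp
    · have hq' := hq
      unfold pvQ at hq'
      simp only [Bool.and_eq_true, decide_eq_true_eq, not_and] at hq'
      have hstep : pvStepA mn mx x (none, 0) p = (none, 0) := by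
        unfold pvStepA
        split_ifs with h1 h2
        · rfl
        · push Not at h1
          exact absurd h1.2 (hq' h2.1 h1.1)
        · rfl
      rw [List.foldl_cons, hstep, List.filter_cons_of_neg (by simp [hq])]
      exact ih (fun q hqm => hpos q (by simp [hqm])) hsort.2

-- ---- B's scan in closed form ----
theorem pv_scan_eq (base borne mn mx x : Int) (ps : List Int) :
    pvScan base borne mn mx x ps =
      match (ps.filter (pvQB base borne mn mx x)).head? with
      | none => [mn, 0, mx]
      | some p => pvBuild mn mx p := by
  induction ps with
  | nil => rfl
  | cons p rest ih =>
    by_cases h1 : PySem.Int.mod p base = 0 ∧ PySem.Int.floordiv p base ≤ borne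
    · by_cases h2 : pvTot mn mx p ≤ x
      · have hq : pvQB base borne mn mx x p = true := by
          unfold pvQB
          simp [h1.2, h2, (PySem.Int.mod_eq_zero_iff_dvd p base).1 h1.1]
        rw [List.filter_cons_of_pos hq]
        show pvScan base borne mn mx x (p :: rest) = pvBuild mn mx p
        unfold pvScan
        rw [if_pos h1, if_pos (by unfold pvTot at h2; omega)]
        rfl
      · have hq : pvQB base borne mn mx x p = false := by
          unfold pvQB; simp [h2]
        rw [List.filter_cons_of_neg (by simp [hq])]
        show pvScan base borne mn mx x (p :: rest) = _
        unfold pvScan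
        rw [if_pos h1, if_neg (by unfold pvTot at h2; omega)]
        exact ih
    · have hq : pvQB base borne mn mx x p = false := by
        unfold pvQB
        rcases not_and_or.1 h1 with h | h
        · simp [(not_iff_not.2 (PySem.Int.mod_eq_zero_iff_dvd p base)).1 h]
        · simp [h]
      rw [List.filter_cons_of_neg (by simp [hq])]
      show pvScan base borne mn mx x (p :: rest) = _
      unfold pvScan
      rw [if_neg h1]
      exact ih

-- ---- the divisor loop computes the divisors below and above the square root ----
theorem pv_gcd_eq (a b : Nat) : pvGcd a b = Nat.gcd a b := by
  induction b using Nat.strong_induction_on generalizing a with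
  | _ b ih =>
    unfold pvGcd
    split_ifs with h
    · simp [h]
    · rw [ih (a % b) (Nat.mod_lt _ (Nat.pos_of_ne_zero h))]
      rw [Nat.gcd_comm b (a % b), ← Nat.gcd_rec b a, Nat.gcd_comm]

theorem pv_divLoop_eq (g : Nat) : ∀ k i, g.sqrt + 1 - i = k → 1 ≤ i → ∀ small large : List Int,
    pvDivLoop g i small large = (small ++ pvSmallSpec g i, large ++ pvLargeSpec g i) := by
  intro k
  induction k with
  | zero =>
    intro i hk hi small large
    have hgt : g.sqrt < i := by omega
    have hii : ¬ i * i ≤ g := fun hle => absurd (Nat.le_sqrt.2 hle) (by omega)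
    unfold pvDivLoop
    rw [if_neg hii]
    have h0 : g.sqrt + 1 - i = 0 := by omega
    simp [pvSmallSpec, pvLargeSpec, h0]
  | succ k ihk =>
    intro i hk hi small large
    have hle : i ≤ g.sqrt := by omega
    have hii : i * i ≤ g := Nat.le_sqrt.1 hle
    have hrange : List.range' i (g.sqrt + 1 - i) = i :: List.range' (i + 1) (g.sqrt + 1 - (i + 1)) := by
      have h1 : g.sqrt + 1 - i = (g.sqrt + 1 - (i + 1)) + 1 := by omega
      rw [h1, List.range'_succ]
    have hsm : pvSmallSpec g i =
        (if g % i = 0 then [(i : Int)] else []) ++ pvSmallSpec g (i + 1) := by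
      unfold pvSmallSpec
      rw [hrange, List.filter_cons]
      by_cases hmod : g % i = 0 <;> simp [hmod]
    have hlg : pvLargeSpec g i =
        (if g % i = 0 ∧ i * i ≠ g then [((g / i : Nat) : Int)] else []) ++ pvLargeSpec g (i + 1) := by
      unfold pvLargeSpec
      rw [hrange, List.filter_cons]
      by_cases hmod : g % i = 0 <;> by_cases hne : i * i = g <;> simp [hmod, hne]
    unfold pvDivLoop
    rw [if_pos hii]
    by_cases hmod : g % i = 0
    · rw [if_pos hmod, ihk (i + 1) (by omega) (by omega), hsm, hlg]
      by_cases hne : i * i = g <;> simp [hmod, hne]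
    · rw [if_neg hmod, ihk (i + 1) (by omega) (by omega), hsm, hlg]
      simp [hmod]

-- ---- membership and ordering of the divisor candidate list ----
theorem pv_mod_zero {e g : Nat} (h : e ∣ g) : g % e = 0 := by
  obtain ⟨c, rfl⟩ := h; exact Nat.mul_mod_right e c

theorem pv_div_lt_div (n a b : Nat) (hn : 0 < n) (ha : 0 < a) (hadvd : a ∣ n) (hb : b ∣ n)
    (hab : a < b) : n / b < n / a := by
  have hbpos : 0 < b := lt_trans ha hab
  have h1 : n / b * b = n := Nat.div_mul_cancel hb
  have hpos : 0 < n / b := Nat.div_pos (Nat.le_of_dvd hn hb) hbpos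
  have h2 : n / b * a < n := by nlinarith
  have h3 : n / a * a = n := Nat.div_mul_cancel hadvd
  have h4 : n / b * a < n / a * a := by rw [h3]; exact h2
  exact Nat.lt_of_mul_lt_mul_right h4

theorem pv_large_gt_sqrt (g d : Nat) (hg : 1 ≤ g) (hd : 1 ≤ d) (hdvd : d ∣ g)
    (hle : d ≤ g.sqrt) (hne : d * d ≠ g) : g.sqrt < g / d := by
  by_contra hcon
  push Not at hcon
  have hmul : d * (g / d) = g := Nat.mul_div_cancel' hdvd
  have hdpos : 0 < g / d := Nat.div_pos (Nat.le_of_dvd (by omega) hdvd) (by omega)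
  have hsq : g.sqrt * g.sqrt ≤ g := Nat.sqrt_le g
  have h1 : g ≤ g.sqrt * g.sqrt := by
    calc g = d * (g / d) := hmul.symm
    _ ≤ g.sqrt * g.sqrt := Nat.mul_le_mul hle hcon
  have heq : g.sqrt * g.sqrt = g := by omega
  rcases Nat.lt_or_ge d g.sqrt with hlt | hge
  · have : d * (g / d) < g.sqrt * g.sqrt := by nlinarith
    omega
  · have hdeq : d = g.sqrt := by omega
    have hgd : g / d = d := by nlinarith
    exact hne (by rw [← hmul, hgd])

theorem pv_mem_large (g : Nat) (q : Int) :
    q ∈ pvLargeSpec g 1 ↔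
      ∃ d : Nat, 1 ≤ d ∧ d ≤ g.sqrt ∧ d ∣ g ∧ d * d ≠ g ∧ q = ((g / d : Nat) : Int) := by
  simp only [pvLargeSpec, List.mem_map, List.mem_filter, List.mem_range'_1, Bool.and_eq_true,
    beq_iff_eq, Bool.not_eq_eq_eq_not, Bool.not_true, beq_eq_false_iff_ne, ne_eq]
  constructor
  · rintro ⟨d, ⟨⟨h1, h2⟩, hmod, hne⟩, rfl⟩
    exact ⟨d, h1, by omega, Nat.dvd_of_mod_eq_zero hmod, hne, rfl⟩
  · rintro ⟨d, h1, h2, hdvd, hne, rfl⟩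
    exact ⟨d, ⟨⟨h1, by omega⟩, pv_mod_zero hdvd, hne⟩, rfl⟩

theorem pv_mem_cands (g : Nat) (hg : 1 ≤ g) (q : Int) :
    q ∈ pvSmallSpec g 1 ++ (pvLargeSpec g 1).reverse ↔ 1 ≤ q ∧ q ∣ (g : Int) := by
  rw [List.mem_append, List.mem_reverse, pv_mem_large]
  constructor
  · rintro (hs | ⟨d, h1, h2, hdvd, hne, rfl⟩)
    · simp only [pvSmallSpec, List.mem_map, List.mem_filter, List.mem_range'_1, beq_iff_eq] at hs
      obtain ⟨d, ⟨⟨hd1, _⟩, hmod⟩, rfl⟩ := hs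
      exact ⟨by exact_mod_cast hd1, Int.natCast_dvd_natCast.2 (Nat.dvd_of_mod_eq_zero hmod)⟩
    · have h1' : 1 ≤ g / d := Nat.div_pos (Nat.le_of_dvd (by omega) hdvd) (by omega)
      exact ⟨by exact_mod_cast h1', Int.natCast_dvd_natCast.2 (Nat.div_dvd_of_dvd hdvd)⟩
  · rintro ⟨hq1, hqdvd⟩
    obtain ⟨e, rfl⟩ : ∃ e : Nat, q = (e : Int) := ⟨q.toNat, (Int.toNat_of_nonneg (by omega)).symm⟩
    have he1 : 1 ≤ e := by exact_mod_cast hq1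
    have hedvd : e ∣ g := Int.natCast_dvd_natCast.1 hqdvd
    rcases le_or_gt e g.sqrt with hle | hgt
    · left
      simp only [pvSmallSpec, List.mem_map, List.mem_filter, List.mem_range'_1, beq_iff_eq]
      exact ⟨e, ⟨⟨he1, by omega⟩, pv_mod_zero hedvd⟩, rfl⟩
    · right
      have heg : e ≤ g := Nat.le_of_dvd (by omega) hedvd
      have hd1 : 1 ≤ g / e := Nat.div_pos heg (by omega)
      have hde : g / e * e = g := Nat.div_mul_cancel hedvd
      have hee : g < e * e := by
        have := Nat.lt_succ_sqrt g
        nlinarith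
      have hlt : g / e < e := by nlinarith
      have hdd : g / e * (g / e) < g := by nlinarith
      refine ⟨g / e, hd1, Nat.le_sqrt.2 (by omega), Nat.div_dvd_of_dvd hedvd, by omega, ?_⟩
      rw [Nat.div_div_self hedvd (by omega)]

theorem pv_pairwise_cands (g : Nat) :
    (pvSmallSpec g 1 ++ (pvLargeSpec g 1).reverse).Pairwise (· < ·) := by
  rcases Nat.eq_zero_or_pos g with hg | hg
  · subst hg; simp [pvSmallSpec, pvLargeSpec]
  rw [List.pairwise_append]
  refine ⟨?_, ?_, ?_⟩
  · unfold pvSmallSpec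
    rw [List.pairwise_map]
    exact ((List.pairwise_lt_range' 1).sublist List.filter_sublist).imp
      (by intro a b h; exact_mod_cast h)
  · rw [List.pairwise_reverse]
    unfold pvLargeSpec
    rw [List.pairwise_map]
    have hpw : ((List.range' 1 (g.sqrt + 1 - 1)).filter
        (fun d : Nat => g % d == 0 && !(d * d == g))).Pairwise (· < ·) :=
      (List.pairwise_lt_range' 1).sublist List.filter_sublist
    refine List.Pairwise.imp_of_mem ?_ hpw
    intro a b ha hb hab
    simp only [List.mem_filter, List.mem_range'_1, Bool.and_eq_true, beq_iff_eq] at ha hb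
    have hadvd : a ∣ g := Nat.dvd_of_mod_eq_zero ha.2.1
    have hbdvd : b ∣ g := Nat.dvd_of_mod_eq_zero hb.2.1
    have := pv_div_lt_div g a b hg ha.1.1 hadvd hbdvd hab
    show ((g / b : Nat) : Int) < ((g / a : Nat) : Int)
    exact_mod_cast this
  · intro q hq r hr
    rw [List.mem_reverse, pv_mem_large] at hr
    obtain ⟨d, hd1, hd2, hdvd, hne, rfl⟩ := hr
    have hgt := pv_large_gt_sqrt g d hg hd1 hdvd hd2 hne
    simp only [pvSmallSpec, List.mem_map, List.mem_filter, List.mem_range'_1, beq_iff_eq] at hq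
    obtain ⟨e, ⟨⟨he1, he2⟩, hmod⟩, rfl⟩ := hq
    have : e ≤ g.sqrt := by omega
    exact_mod_cast by omega

-- ---- two strictly increasing lists with the same members are equal ----
theorem pv_sorted_lt_eq_of_mem {l1 l2 : List Int} (h1 : l1.Pairwise (· < ·))
    (h2 : l2.Pairwise (· < ·)) (hm : ∀ y, y ∈ l1 ↔ y ∈ l2) : l1 = l2 := by
  have n1 : l1.Nodup := h1.imp ne_of_lt
  have n2 : l2.Nodup := h2.imp ne_of_lt
  have hp : l1.Perm l2 := (List.perm_ext_iff_of_nodup n1 n2).2 hm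
  exact hp.eq_of_pairwise (fun a b _ _ h h' => le_antisymm h h') (h1.imp le_of_lt) (h2.imp le_of_lt)

-- ---- the two candidate lists coincide ----
theorem pv_lists_eq (mn mx base borne : Int) (hb : 0 < base) (hborne : borne = mx / base) :
    ((PySem.List.pyRange 1 (borne + 1) 1).map (· * base)).filter
        (fun p => decide (p ∣ mn) && decide (p ∣ mx))
      = (pvSmallSpec (Int.gcd mn mx) 1 ++ (pvLargeSpec (Int.gcd mn mx) 1).reverse).filter
        (fun p => decide (base ∣ p) && decide (PySem.Int.floordiv p base ≤ borne)) := by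
  rcases Nat.eq_zero_or_pos (Int.gcd mn mx) with hg | hg
  · have hmn : mn = 0 := (Int.gcd_eq_zero_iff.1 hg).1
    have hmx : mx = 0 := (Int.gcd_eq_zero_iff.1 hg).2
    have hb0 : borne = 0 := by rw [hborne, hmx, Int.zero_ediv]
    rw [hb0, PySem.List.pyRange_one_eq_nil (by omega)]
    simp [pvSmallSpec, pvLargeSpec, hg]
  · apply pv_sorted_lt_eq_of_mem
    · exact ((PySem.List.pairwise_lt_pyRange_one 1 (borne + 1)).map _
        (fun a b h => mul_lt_mul_of_pos_right h hb)).sublist List.filter_sublist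
    · exact (pv_pairwise_cands _).sublist List.filter_sublist
    · intro y
      rw [List.mem_filter, List.mem_filter, pv_mem_cands _ hg y]
      simp only [List.mem_map, PySem.List.mem_pyRange_one, Bool.and_eq_true, decide_eq_true_eq]
      constructor
      · rintro ⟨⟨f, ⟨hf1, hf2⟩, rfl⟩, hdmn, hdmx⟩
        refine ⟨⟨by nlinarith, Int.dvd_coe_gcd_iff.2 ⟨hdmn, hdmx⟩⟩, ⟨f, mul_comm f base⟩, ?_⟩
        rw [PySem.Int.floordiv_eq_ediv_of_pos hb, Int.mul_ediv_cancel f (ne_of_gt hb)]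
        omega
      · rintro ⟨⟨hy1, hyg⟩, ⟨k, rfl⟩, hble⟩
        have hk1 : 1 ≤ k := by nlinarith
        rw [PySem.Int.floordiv_eq_ediv_of_pos hb, Int.mul_ediv_cancel_left k (ne_of_gt hb)] at hble
        have hdv := Int.dvd_coe_gcd_iff.1 hyg
        exact ⟨⟨k, ⟨hk1, by omega⟩, mul_comm k base⟩, hdv.1, hdv.2⟩

-- ---- the two else-branches of the ports agree ----
theorem pv_core (mn mx base x : Int) (hb : 0 < base) :
    (match ((PySem.List.pyRange 1 (PySem.Int.floordiv (mx - 0) base + 1) 1).foldl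
        (fun st facteur =>
          if PySem.Int.mod (0 - mn) (facteur * base) ≠ 0 ∨
             PySem.Int.mod (mx - 0) (facteur * base) ≠ 0 then st
          else
            if 1 + ((PySem.List.pyRange (mn + facteur * base) 0 (facteur * base)).length : Int) + 1
                 + ((PySem.List.pyRange (facteur * base) mx (facteur * base)).length : Int) + 1 ≤ x ∧
               1 + ((PySem.List.pyRange (mn + facteur * base) 0 (facteur * base)).length : Int) + 1
                 + ((PySem.List.pyRange (facteur * base) mx (facteur * base)).length : Int) + 1 > st.2 then
              (some ([mn] ++ PySem.List.pyRange (mn + facteur * base) 0 (facteur * base) ++ [0]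
                 ++ PySem.List.pyRange (facteur * base) mx (facteur * base) ++ [mx]),
               1 + ((PySem.List.pyRange (mn + facteur * base) 0 (facteur * base)).length : Int) + 1
                 + ((PySem.List.pyRange (facteur * base) mx (facteur * base)).length : Int) + 1)
            else st)
        ((none : Option (List Int)), (0 : Int))).1 with
      | none => [mn, 0, mx]
      | some r => r)
    = pvScan base (PySem.Int.floordiv mx base) mn mx x
        ((pvDivLoop (pvGcd mn.natAbs mx.natAbs) 1 [] []).1
          ++ (pvDivLoop (pvGcd mn.natAbs mx.natAbs) 1 [] []).2.reverse) := by
  have hbody : (fun (st : Option (List Int) × Int) (facteur : Int) =>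
      if PySem.Int.mod (0 - mn) (facteur * base) ≠ 0 ∨
         PySem.Int.mod (mx - 0) (facteur * base) ≠ 0 then st
      else
        if 1 + ((PySem.List.pyRange (mn + facteur * base) 0 (facteur * base)).length : Int) + 1
             + ((PySem.List.pyRange (facteur * base) mx (facteur * base)).length : Int) + 1 ≤ x ∧
           1 + ((PySem.List.pyRange (mn + facteur * base) 0 (facteur * base)).length : Int) + 1
             + ((PySem.List.pyRange (facteur * base) mx (facteur * base)).length : Int) + 1 > st.2 then
          (some ([mn] ++ PySem.List.pyRange (mn + facteur * base) 0 (facteur * base) ++ [0]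
             ++ PySem.List.pyRange (facteur * base) mx (facteur * base) ++ [mx]),
           1 + ((PySem.List.pyRange (mn + facteur * base) 0 (facteur * base)).length : Int) + 1
             + ((PySem.List.pyRange (facteur * base) mx (facteur * base)).length : Int) + 1)
        else st)
      = fun st f => pvStepA mn mx x st (f * base) := by
    funext st f
    have hcondA : (PySem.Int.mod (0 - mn) (f * base) ≠ 0 ∨
        PySem.Int.mod (mx - 0) (f * base) ≠ 0) ↔ ¬(f * base ∣ mn ∧ f * base ∣ mx) := by
      rw [Ne, Ne, PySem.Int.mod_eq_zero_iff_dvd, PySem.Int.mod_eq_zero_iff_dvd, sub_zero,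
        zero_sub, Int.dvd_neg]
      tauto
    have htot : (1 : Int) + ((PySem.List.pyRange (mn + f * base) 0 (f * base)).length : Int) + 1
        + ((PySem.List.pyRange (f * base) mx (f * base)).length : Int) + 1
        = pvTot mn mx (f * base) := by
      unfold pvTot; ring
    unfold pvStepA
    by_cases h1 : f * base ∣ mn ∧ f * base ∣ mx
    · rw [htot]
      rw [if_neg (fun hc => (hcondA.1 hc) h1)]
      rw [if_neg (show ¬(¬(f * base ∣ mn) ∨ ¬(f * base ∣ mx)) from
        fun hc => Or.elim hc (fun hna => hna h1.1) (fun hnb => hnb h1.2))]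
      rfl
    · rw [if_pos (hcondA.2 h1), if_pos (not_and_or.1 h1)]
  rw [hbody]
  have hmap : (PySem.List.pyRange 1 (PySem.Int.floordiv (mx - 0) base + 1) 1).foldl
      (fun st f => pvStepA mn mx x st (f * base)) ((none : Option (List Int)), (0 : Int))
      = ((PySem.List.pyRange 1 (PySem.Int.floordiv (mx - 0) base + 1) 1).map (· * base)).foldl
        (pvStepA mn mx x) ((none : Option (List Int)), (0 : Int)) := (List.foldl_map).symm
  rw [hmap, sub_zero]
  have hborne : PySem.Int.floordiv mx base = mx / base := PySem.Int.floordiv_eq_ediv_of_pos hb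
  have hpos : ∀ p ∈ (PySem.List.pyRange 1 (PySem.Int.floordiv mx base + 1) 1).map (· * base), 0 < p := by
    intro p hp
    simp only [List.mem_map, PySem.List.mem_pyRange_one] at hp
    obtain ⟨f, ⟨hf1, _⟩, rfl⟩ := hp
    nlinarith
  have hsort : ((PySem.List.pyRange 1 (PySem.Int.floordiv mx base + 1) 1).map (· * base)).Pairwise (· ≤ ·) :=
    ((PySem.List.pairwise_lt_pyRange_one 1 (PySem.Int.floordiv mx base + 1)).map _
      (fun a b h => mul_lt_mul_of_pos_right h hb)).imp le_of_lt
  rw [pv_ff mn mx x _ hpos hsort]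
  have hgcd : pvGcd mn.natAbs mx.natAbs = Int.gcd mn mx := by
    rw [pv_gcd_eq]; rfl
  rw [hgcd, pv_divLoop_eq (Int.gcd mn mx) ((Int.gcd mn mx).sqrt + 1 - 1) 1 rfl (le_refl 1) [] []]
  simp only [List.nil_append]
  rw [pv_scan_eq]
  have hfA : ((PySem.List.pyRange 1 (PySem.Int.floordiv mx base + 1) 1).map (· * base)).filter
        (pvQ mn mx x)
      = (((PySem.List.pyRange 1 (PySem.Int.floordiv mx base + 1) 1).map (· * base)).filter
          (fun p => decide (p ∣ mn) && decide (p ∣ mx))).filter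
        (fun p => decide (pvTot mn mx p ≤ x)) := by
    rw [List.filter_filter]; rfl
  have hfB : (pvSmallSpec (Int.gcd mn mx) 1 ++ (pvLargeSpec (Int.gcd mn mx) 1).reverse).filter
        (pvQB base (PySem.Int.floordiv mx base) mn mx x)
      = ((pvSmallSpec (Int.gcd mn mx) 1 ++ (pvLargeSpec (Int.gcd mn mx) 1).reverse).filter
          (fun p => decide (base ∣ p) && decide (PySem.Int.floordiv p base ≤ PySem.Int.floordiv mx base))).filter
        (fun p => decide (pvTot mn mx p ≤ x)) := by
    rw [List.filter_filter]; rfl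
  rw [hfA, hfB, pv_lists_eq mn mx base (PySem.Int.floordiv mx base) hb hborne]
  cases hh : (((pvSmallSpec (Int.gcd mn mx) 1 ++ (pvLargeSpec (Int.gcd mn mx) 1).reverse).filter
      (fun p => decide (base ∣ p) && decide (PySem.Int.floordiv p base ≤ PySem.Int.floordiv mx base))).filter
      (fun p => decide (pvTot mn mx p ≤ x))).head? with
  | none => simp
  | some p => simp

-- ===== VERDICT (by name: the statement is the Claim_ definition above) =====
theorem reduire_intervalles_spec : Claim_equal_reduire_intervalles := by
  intro liste x _hdom hpre
  unfold Spec_reduire_intervalles reduire_intervalles reduire_intervalles_alt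
  by_cases hx : x < 3
  · rw [if_pos hx, if_pos hx]
  · rw [if_neg hx, if_neg hx]
    obtain ⟨hlen, hne⟩ := hpre.resolve_left hx
    set s := PySem.List.sorted liste (fun v => v) with hs
    have hslen : 2 ≤ s.length := by rw [hs, PySem.List.length_sorted]; exact hlen
    have e0 : PySem.List.pyGetD s 0 0 = s.getD 0 0 := PySem.List.pyGetD_ofNat' s 0 0
    have e1 : PySem.List.pyGetD s 1 0 = s.getD 1 0 := PySem.List.pyGetD_ofNat' s 1 0
    have hlen' : 1 < (PySem.List.sorted liste (fun x => x)).length := by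
      rw [PySem.List.length_sorted]; omega
    have mono : (PySem.List.sorted liste (fun x => x)).getD 0 0 ≤
        (PySem.List.sorted liste (fun x => x)).getD 1 0 := by
      rw [List.getD_eq_getElem _ 0 (by omega), List.getD_eq_getElem _ 0 hlen']
      exact PySem.List.sorted_id_getElem_mono liste (by omega) hlen'
    rw [← hs] at mono
    have hb : 0 < PySem.List.pyGetD s 1 0 - PySem.List.pyGetD s 0 0 := by
      rw [e0, e1]
      rw [e0, e1] at hne
      omega
    exact pv_core (PySem.List.pyGetD s 0 0) (PySem.List.pyGetD s (-1) 0)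
      (PySem.List.pyGetD s 1 0 - PySem.List.pyGetD s 0 0) x hb
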